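-- pv_equiv track=rewrite | github.com/ShanliAlefkhani/University-DM | phase2/oneR.py | oneR_firstStep
-- ===== SOURCE A (Python) =====
-- def oneR_firstStep(data):
--     temp_d = []
--     start = 0
--     end = 0
--     while end < len(data):
--         c = data[start][1]
--         end = start
--         for d in data[start:]:
--             if d[1] != c:
--                 temp_d.append([start, end-1])
--                 start = end
--                 break
--             end += 1
--     return temp_d
-- ===== SOURCE B (Python) =====
-- def oneR_firstStep(data):
--     if not data:
--         return []
--     res = []
--     start = 0
--     prev = data[0][1]
--     for i, row in enumerate(data[1:], 1):
--         cur = row[1]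
--         if cur != prev:
--             res.append([start, i - 1])
--             start = i
--         prev = cur
--     return res
-- ===== Notes on version B (the rewrite author's own statement) =====
-- stated objective: alternative
-- what changed: Replaced A's while-loop that re-slices and rescans the list from each run's start with a single forward pass comparing each row's label to the previous one, closing a run at each change point (the final run is never appended, matching A).
-- outside the precondition, e.g. on oneR_firstStep([[1]]): A raises IndexError, B raises IndexError
import Mathlib
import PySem

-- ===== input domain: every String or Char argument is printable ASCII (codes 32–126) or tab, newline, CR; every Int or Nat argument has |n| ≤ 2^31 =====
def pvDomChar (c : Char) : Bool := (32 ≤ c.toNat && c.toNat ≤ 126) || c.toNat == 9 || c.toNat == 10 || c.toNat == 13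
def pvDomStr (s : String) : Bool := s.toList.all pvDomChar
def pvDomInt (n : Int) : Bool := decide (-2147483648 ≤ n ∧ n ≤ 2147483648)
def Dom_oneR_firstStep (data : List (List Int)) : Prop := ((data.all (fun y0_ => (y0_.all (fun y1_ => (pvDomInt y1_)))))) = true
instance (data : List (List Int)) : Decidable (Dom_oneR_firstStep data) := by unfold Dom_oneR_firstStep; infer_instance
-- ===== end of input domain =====

-- B replaces A's rescan-from-run-start while-loop with one forward pass comparing
-- each label to the previous one (objective: alternative single-pass formulation).

-- ===== PORT A =====
-- row[1]; total via default 0, Pre_ guarantees index 1 exists (otherwise Python raises IndexError)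
def pvRow1 (d : List Int) : Int := (PySem.List.pyGet? d 1).getD 0

-- the inner 'for d in data[start:]' loop: returns the Python variable 'end' at break, none if no break
def pvInnerA (c : Int) (l : List (List Int)) (e : Nat) : Option Nat :=
  match l with
  | [] => none
  | d :: rest => if pvRow1 d ≠ c then some e else pvInnerA c rest (e + 1)

-- needed by loopA's termination proof
theorem pvInnerA_ge (c : Int) (l : List (List Int)) (e : Nat) (eb : Nat)
    (h : pvInnerA c l e = some eb) : e ≤ eb := by
  induction l generalizing e with
  | nil => simp [pvInnerA] at h
  | cons d rest ih =>
    simp only [pvInnerA] at h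
    split at h
    · simp only [Option.some.injEq] at h; omega
    · have := ih (e + 1) h; omega

-- A's outer while-loop.  At each test of 'end < len(data)' the Python variables start
-- and end are equal (initially both 0; after a break both equal the break position),
-- so a single parameter carries them; when the inner loop finishes without break,
-- end = len(data) and the while-test fails, returning the accumulator.
def pvLoopA (data : List (List Int)) (acc : List (List Int)) (start : Nat) :
    List (List Int) :=
  if hlt : start < data.length then
    -- Python's run label c = data[start][1], passed directly to the inner scan
    match hin : pvInnerA (pvRow1 (data.getD start [])) (data.drop start) start with
    | some eb => pvLoopA data (acc ++ [[(start : Int), (eb : Int) - 1]]) eb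
    | none => acc
  else acc
termination_by data.length - start
decreasing_by
  have hdrop : data.drop start = data[start] :: data.drop (start + 1) :=
    List.drop_eq_getElem_cons hlt
  rw [hdrop, List.getD_eq_getElem data [] hlt] at hin
  rw [show pvInnerA (pvRow1 data[start]) (data[start] :: data.drop (start + 1)) start
        = pvInnerA (pvRow1 data[start]) (data.drop (start + 1)) (start + 1) from by
      simp [pvInnerA]] at hin
  have := pvInnerA_ge _ _ _ _ hin
  omega

def oneR_firstStep (data : List (List Int)) : List (List Int) :=
  pvLoopA data [] 0

-- ===== PORT B =====
-- single forward pass: compare each label to the previous, close a run at each change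
def pvLoopB (prev : Int) (l : List (List Int)) (i : Nat) (start : Nat)
    (res : List (List Int)) : List (List Int) :=
  match l with
  | [] => res
  | d :: rest =>
    let cur := pvRow1 d
    if cur ≠ prev then pvLoopB cur rest (i + 1) i (res ++ [[(start : Int), (i : Int) - 1]])
    else pvLoopB cur rest (i + 1) start res

def oneR_firstStep_alt (data : List (List Int)) : List (List Int) :=
  match data with
  | [] => []
  | d :: rest => pvLoopB (pvRow1 d) rest 1 0 []

-- ===== PRECONDITION & SPEC =====
-- Pre_ excludes exactly the inputs where Python A raises IndexError: a row with fewer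
-- than 2 elements (A reads d[1] of every row it scans).
def Pre_oneR_firstStep (data : List (List Int)) : Prop :=
  ∀ d ∈ data, 2 ≤ d.length
instance (data : List (List Int)) : Decidable (Pre_oneR_firstStep data) := by
  unfold Pre_oneR_firstStep; infer_instance

def pvWitness_oneR_firstStep : List (List Int) := [[1, 4], [2, 4], [3, 7]]

def Spec_oneR_firstStep (data : List (List Int)) (out : List (List Int)) : Prop := out = oneR_firstStep_alt data
instance (data : List (List Int)) (out : List (List Int)) : Decidable (Spec_oneR_firstStep data out) := by unfold Spec_oneR_firstStep; infer_instance

-- ===== CLAIM (what is proved, stated in full; the proofs are below) =====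
def Claim_equal_oneR_firstStep : Prop := ∀ (data : List (List Int)), Dom_oneR_firstStep data → Pre_oneR_firstStep data → Spec_oneR_firstStep data (oneR_firstStep data)

-- ===== LEMMAS AND PROOFS =====

-- proof helper: A's continuation after the inner scan returned r
def pvAfterScan (data : List (List Int)) (acc : List (List Int)) (start : Nat)
    (r : Option Nat) : List (List Int) :=
  match r with
  | some eb => pvLoopA data (acc ++ [[(start : Int), (eb : Int) - 1]]) eb
  | none => acc

theorem pvLoopA_enter (data : List (List Int)) (acc : List (List Int)) (start : Nat)
    (hlt : start < data.length) :
    pvLoopA data acc start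
      = pvAfterScan data acc start
          (pvInnerA (pvRow1 (data.getD start [])) (data.drop start) start) := by
  rw [pvLoopA.eq_def, dif_pos hlt]
  split
  · rename_i eb heq
    simp only [List.getD] at heq
    simp [pvAfterScan, heq]
  · rename_i heq
    simp only [List.getD] at heq
    simp [pvAfterScan, heq]

-- bridge: from a state where A is about to scan the suffix t = data.drop e with
-- current run label c and run start 'start', A's remaining computation equals B's
-- remaining single pass over t.
theorem pv_bridge (t : List (List Int)) (data : List (List Int)) (c : Int)
    (start e : Nat) (acc : List (List Int)) (ht : data.drop e = t) :
    pvAfterScan data acc start (pvInnerA c t e) = pvLoopB c t e start acc := by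
  induction t generalizing c start e acc with
  | nil => simp [pvInnerA, pvAfterScan, pvLoopB]
  | cons d rest ih =>
    have hlt : e < data.length := by
      have := congrArg List.length ht
      simp [List.length_drop] at this
      omega
    have h3 : data[e] :: data.drop (e + 1) = d :: rest :=
      (List.drop_eq_getElem_cons hlt).symm.trans ht
    injection h3 with hde hdrop1
    by_cases hd : pvRow1 d = c
    · -- labels agree: both just advance
      rw [show pvInnerA c (d :: rest) e = pvInnerA c rest (e + 1) from by
            simp [pvInnerA, hd],
          ih c start (e + 1) acc hdrop1]
      simp [pvLoopB, hd]
    · -- break at position e: A closes the run [start, e-1] and restarts at e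
      rw [show pvInnerA c (d :: rest) e = some e from by simp [pvInnerA, hd]]
      show pvLoopA data (acc ++ [[(start : Int), (e : Int) - 1]]) e = _
      rw [pvLoopA_enter data _ e hlt]
      rw [show data.getD e [] = d from by
            rw [List.getD_eq_getElem data [] hlt, hde]]
      rw [ht]
      rw [show pvInnerA (pvRow1 d) (d :: rest) e = pvInnerA (pvRow1 d) rest (e + 1) from by
            simp [pvInnerA]]
      rw [ih (pvRow1 d) e (e + 1) (acc ++ [[(start : Int), (e : Int) - 1]]) hdrop1]
      simp [pvLoopB, hd]

-- ===== VERDICT (by name: the statement is the Claim_ definition above) =====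
theorem oneR_firstStep_spec : Claim_equal_oneR_firstStep := by
  intro data _ _
  unfold Spec_oneR_firstStep oneR_firstStep oneR_firstStep_alt
  cases data with
  | nil => rw [pvLoopA.eq_def]; simp
  | cons d rest =>
    rw [pvLoopA_enter (d :: rest) [] 0 (by simp)]
    show pvAfterScan (d :: rest) [] 0 (pvInnerA (pvRow1 d) (d :: rest) 0)
          = pvLoopB (pvRow1 d) rest 1 0 []
    rw [show pvInnerA (pvRow1 d) (d :: rest) 0 = pvInnerA (pvRow1 d) rest 1 from by
          simp [pvInnerA]]
    exact pv_bridge rest (d :: rest) (pvRow1 d) 0 1 [] rfl
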